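-- pv_equiv track=rewrite | github.com/siliviu/uni | sem1/fp/lab13/13.py | back_it
-- ===== SOURCE A (Python) =====
-- def back_it(l: list):
--     sol = []
--     ind = [-1]
--     l = sorted(l)
--     n = len(l)
--     while len(ind) > 0:
--         ok = 0
--         while ind[-1] < n:
--             ind[-1] += 1
--             if ind[-1] == n-1:
--                 sol.append([l[x] for x in ind] + [l[x] for x in range(n-1, -1, -1) if x not in ind])
--                 break
--             ind.append(ind[-1])
--             ok = 1
--             break
--         if not ok:
--             ind.pop()
--     return sol
-- ===== SOURCE B (Python) =====
-- def back_it(l: list):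
--     l = sorted(l)
--     n = len(l)
--     sol = []
--
--     def gen(chain, start):
--         for v in range(start, n):
--             if v == n - 1:
--                 c = chain + [v]
--                 sol.append([l[x] for x in c] +
--                            [l[x] for x in range(n - 1, -1, -1) if x not in c])
--             else:
--                 gen(chain + [v], v + 1)
--
--     gen([], 0)
--     return sol
-- ===== Notes on version B (the rewrite author's own statement) =====
-- stated objective: simpler
-- what changed: A's explicit-stack backtracking with two nested while loops, an ok flag and in-place stack mutation is replaced by a direct recursive generator over the chain of chosen indices, emitting each arrangement when the chain reaches the last index.
import Mathlib
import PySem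

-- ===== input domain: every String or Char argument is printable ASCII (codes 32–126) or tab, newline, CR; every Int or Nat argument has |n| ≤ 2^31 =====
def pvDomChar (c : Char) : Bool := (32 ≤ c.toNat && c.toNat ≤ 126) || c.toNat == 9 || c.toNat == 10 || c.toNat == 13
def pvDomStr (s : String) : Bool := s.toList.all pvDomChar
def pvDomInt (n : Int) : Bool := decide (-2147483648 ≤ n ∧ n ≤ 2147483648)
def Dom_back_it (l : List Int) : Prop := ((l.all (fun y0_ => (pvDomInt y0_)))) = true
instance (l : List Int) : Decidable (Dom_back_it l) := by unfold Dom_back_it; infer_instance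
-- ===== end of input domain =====

-- B rewrites A's explicit-stack backtracking as a direct recursion over the chain of
-- chosen indices (objective: simpler decomposition, same output order).

-- ===== PORT A =====
-- Python's stack 'ind' is kept TOP-FIRST here (head = ind[-1]).
-- l[x]: every index reaching the comprehension lies in range, so pyGet?+getD 0 is exact.
def pvGetA (l : List Int) (x : Int) : Int := (PySem.List.pyGet? l x).getD 0

-- sol.append([l[x] for x in ind] + [l[x] for x in range(n-1,-1,-1) if x not in ind])
def pvRecordA (l : List Int) (n : Int) (ind : List Int) : List Int :=
  (ind.reverse.map (pvGetA l)) ++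
    ((PySem.List.pyRange (n-1) (-1) (-1)).filter (fun x => !(ind.contains x))).map (pvGetA l)

-- termination measure for A's while loop
def pvPhi (n : Int) (ind : List Int) : Nat :=
  (ind.map (fun v => 3 ^ ((n + 1 - v).toNat))).sum

lemma pvPhi_cons (n v : Int) (rest : List Int) :
    pvPhi n (v :: rest) = 3 ^ ((n + 1 - v).toNat) + pvPhi n rest := by
  simp [pvPhi]

lemma pvPhi_tail_lt (n v : Int) (rest : List Int) :
    pvPhi n rest < pvPhi n (v :: rest) := by
  have h1 : 1 ≤ 3 ^ ((n + 1 - v).toNat) := Nat.one_le_pow _ _ (by norm_num)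
  rw [pvPhi_cons]; omega

lemma pvPhi_push_lt (n v : Int) (rest : List Int) (h : v < n) :
    pvPhi n ((v+1) :: (v+1) :: rest) < pvPhi n (v :: rest) := by
  have hk : (n + 1 - v).toNat = (n + 1 - (v+1)).toNat + 1 := by omega
  have h1 : 1 ≤ 3 ^ ((n + 1 - (v+1)).toNat) := Nat.one_le_pow _ _ (by norm_num)
  rw [pvPhi_cons, pvPhi_cons, pvPhi_cons, hk, pow_succ]
  omega

lemma pvPhi_head_lt (n v : Int) (rest : List Int) (h : v < n) :
    pvPhi n ((v+1) :: rest) < pvPhi n (v :: rest) := by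
  have hk : (n + 1 - v).toNat = (n + 1 - (v+1)).toNat + 1 := by omega
  have h1 : 1 ≤ 3 ^ ((n + 1 - (v+1)).toNat) := Nat.one_le_pow _ _ (by norm_num)
  rw [pvPhi_cons, pvPhi_cons, hk, pow_succ]
  omega

-- the two nested while loops of A (the inner one always breaks, so one outer pass is:
-- pop if top ≥ n; else increment top, record-then-pop if it hits n-1, else push a copy)
def pvLoopA (l : List Int) (n : Int) (sol : List (List Int)) (ind : List Int) :
    List (List Int) :=
  match ind with
  | [] => sol
  | v :: rest =>
    if _h : v < n then
      if v + 1 = n - 1 then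
        pvLoopA l n (sol ++ [pvRecordA l n ((v+1) :: rest)]) rest
      else
        pvLoopA l n sol ((v+1) :: (v+1) :: rest)
    else
      pvLoopA l n sol rest
termination_by pvPhi n ind
decreasing_by
  · exact pvPhi_tail_lt n (v+1) rest |>.trans (pvPhi_head_lt n v rest _h)
  · exact pvPhi_push_lt n v rest _h
  · exact pvPhi_tail_lt n v rest

def back_it (l : List Int) : List (List Int) :=
  pvLoopA (PySem.List.sorted l (fun x => x) false)
    ((PySem.List.sorted l (fun x => x) false).length : Int) [] [-1]

-- ===== PORT B =====
def pvGetB (l : List Int) (x : Int) : Int := (PySem.List.pyGet? l x).getD 0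

def pvRecordB (l : List Int) (n : Int) (c : List Int) : List Int :=
  (c.map (pvGetB l)) ++
    ((PySem.List.pyRange (n-1) (-1) (-1)).filter (fun x => !(c.contains x))).map (pvGetB l)

-- gen(chain, start): the for-loop over v in range(start, n) as recursion on v
def pvGenB (l : List Int) (n : Int) (chain : List Int) (v : Int) : List (List Int) :=
  if _h : v < n then
    (if v = n - 1 then [pvRecordB l n (chain ++ [v])]
     else pvGenB l n (chain ++ [v]) (v+1)) ++ pvGenB l n chain (v+1)
  else []
termination_by (n - v).toNat
decreasing_by
  · omega
  · omega

def back_it_alt (l : List Int) : List (List Int) :=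
  pvGenB (PySem.List.sorted l (fun x => x) false)
    ((PySem.List.sorted l (fun x => x) false).length : Int) [] 0

-- ===== PRECONDITION & SPEC =====
def Spec_back_it (l : List Int) (out : List (List Int)) : Prop := out = back_it_alt l
instance (l : List Int) (out : List (List Int)) : Decidable (Spec_back_it l out) := by unfold Spec_back_it; infer_instance

-- ===== CLAIM (what is proved, stated in full; the proofs are below) =====
def Claim_equal_back_it : Prop := ∀ (l : List Int), Dom_back_it l → Spec_back_it l (back_it l)

-- ===== LEMMAS AND PROOFS =====
lemma record_eq (l : List Int) (n : Int) (ind : List Int) :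
    pvRecordA l n ind = pvRecordB l n ind.reverse := by
  unfold pvRecordA pvRecordB pvGetA pvGetB
  congr 2
  apply List.filter_congr
  intro x _
  simp

lemma loop_cons (l : List Int) (n : Int) :
    ∀ (m : Nat) (v : Int) (rest : List Int) (sol : List (List Int)),
      pvPhi n (v :: rest) ≤ m →
      pvLoopA l n sol (v :: rest) = pvLoopA l n (sol ++ pvGenB l n rest.reverse (v+1)) rest := by
  intro m
  induction m with
  | zero =>
    intro v rest sol hm
    have := pvPhi_tail_lt n v rest
    omega
  | succ m ih =>
    intro v rest sol hm
    rw [pvLoopA]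
    by_cases h : v < n
    · by_cases h2 : v + 1 = n - 1
      · -- record branch: genB yields exactly the recorded arrangement and stops
        rw [dif_pos h, if_pos h2]
        have hg : pvGenB l n rest.reverse (v+1) = [pvRecordB l n (rest.reverse ++ [v+1])] := by
          rw [pvGenB, dif_pos (show v + 1 < n by omega), if_pos h2,
              pvGenB, dif_neg (show ¬ (v + 1 + 1 < n) by omega)]
          simp
        rw [hg, record_eq, List.reverse_cons]
      · -- push branch
        rw [dif_pos h, if_neg h2]
        have h3 := pvPhi_push_lt n v rest h
        have h4 := pvPhi_head_lt n v rest h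
        rw [ih (v+1) ((v+1) :: rest) sol (Nat.lt_succ_iff.mp (lt_of_lt_of_le h3 hm)),
            ih (v+1) rest _ (Nat.lt_succ_iff.mp (lt_of_lt_of_le h4 hm))]
        have hg : pvGenB l n rest.reverse (v+1) =
            pvGenB l n (rest.reverse ++ [v+1]) (v+1+1) ++ pvGenB l n rest.reverse (v+1+1) := by
          by_cases hlt : v + 1 < n
          · rw [pvGenB, dif_pos hlt, if_neg h2]
          · have hstop : ¬ (v + 1 + 1 < n) := by omega
            rw [pvGenB, dif_neg hlt, pvGenB, dif_neg hstop, pvGenB, dif_neg hstop]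
            simp
        rw [hg, List.reverse_cons, List.append_assoc]
    · -- pop branch: top ≥ n, genB contributes nothing
      rw [dif_neg h]
      have hg : pvGenB l n rest.reverse (v+1) = [] := by
        rw [pvGenB, dif_neg (show ¬ (v + 1 < n) by omega)]
      rw [hg, List.append_nil]

-- ===== VERDICT (by name: the statement is the Claim_ definition above) =====
theorem back_it_spec : Claim_equal_back_it := by
  intro l _
  unfold Spec_back_it back_it back_it_alt
  rw [loop_cons _ _ (pvPhi (((PySem.List.sorted l (fun x => x) false).length : Int)) [-1]) (-1) [] [] le_rfl]
  rw [pvLoopA]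
  norm_num
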